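-- pv_equiv track=rewrite | github.com/arunim2405/JSON-to-Serializer | JsonToSerializer.py | reverse_classes
-- ===== SOURCE A (Python) =====
-- def reverse_classes(code_lines):
--     class_blocks = []
--     current_class = []
--     inside_class = False
--
--     for line in code_lines:
--         if line.startswith('class '):
--             if current_class:
--                 class_blocks.append(current_class)
--             current_class = [line]
--             inside_class = True
--         elif inside_class:
--             current_class.append(line)
--
--     if current_class:
--         class_blocks.append(current_class)
--
--     reversed_class_blocks = class_blocks[::-1]
--
--     reversed_code_lines = [line for block in reversed_class_blocks for line in block]
--     return reversed_code_lines
-- ===== SOURCE B (Python) =====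
-- def reverse_classes(code_lines):
--     out = []
--     block = []
--     for line in reversed(code_lines):
--         block.append(line)
--         if line.startswith('class '):
--             block.reverse()
--             out.extend(block)
--             block = []
--     return out
-- ===== Notes on version B (the rewrite author's own statement) =====
-- stated objective: alternative
-- what changed: B replaces A's flag-driven forward loop that collects a list of blocks and then reverse-flattens it with a single backward scan that accumulates each block in reverse and emits it directly when its 'class ' header is reached, so no block list, flag or final flatten exist.
import Mathlib
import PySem

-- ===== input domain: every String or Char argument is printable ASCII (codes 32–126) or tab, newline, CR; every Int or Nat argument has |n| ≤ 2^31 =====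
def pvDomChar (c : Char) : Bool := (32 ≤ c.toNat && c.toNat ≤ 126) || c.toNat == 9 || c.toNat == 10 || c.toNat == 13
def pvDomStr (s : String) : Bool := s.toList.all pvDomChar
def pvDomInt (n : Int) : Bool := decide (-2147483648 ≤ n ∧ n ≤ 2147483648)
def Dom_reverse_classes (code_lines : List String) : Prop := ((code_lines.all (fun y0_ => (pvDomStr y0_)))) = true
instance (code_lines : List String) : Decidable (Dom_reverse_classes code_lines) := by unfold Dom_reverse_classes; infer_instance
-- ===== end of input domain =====

-- B does the same job as A in one backward pass, emitting each block when its header is met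
-- (alternative decomposition, same cost); equivalence on all inputs is proved below.

-- ===== PORT A =====
-- step of A's for-loop: state = (class_blocks, current_class, inside_class)
def revClsStepA (st : List (List String) × List String × Bool) (line : String) :
    List (List String) × List String × Bool :=
  if PySem.Str.startswith line "class " then
    ((if st.2.1 ≠ [] then st.1 ++ [st.2.1] else st.1), [line], true)
  else if st.2.2 then (st.1, st.2.1 ++ [line], st.2.2)
  else st

def reverse_classes (code_lines : List String) : List String :=
  let st := code_lines.foldl revClsStepA ([], [], false)
  let class_blocks := if st.2.1 ≠ [] then st.1 ++ [st.2.1] else st.1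
  -- class_blocks[::-1] is the reverse; flat comprehension
  (class_blocks.reverse).flatMap id

-- ===== PORT B =====
-- step of B's loop over reversed(code_lines): state = (out, block)
def revClsStepB (st : List String × List String) (line : String) :
    List String × List String :=
  let block := st.2 ++ [line]
  if PySem.Str.startswith line "class " then (st.1 ++ block.reverse, []) else (st.1, block)

def reverse_classes_alt (code_lines : List String) : List String :=
  (code_lines.reverse.foldl revClsStepB ([], [])).1

-- ===== PRECONDITION & SPEC =====
def Spec_reverse_classes (code_lines : List String) (out : List String) : Prop := out = reverse_classes_alt code_lines
instance (code_lines : List String) (out : List String) : Decidable (Spec_reverse_classes code_lines out) := by unfold Spec_reverse_classes; infer_instance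

-- ===== CLAIM (what is proved, stated in full; the proofs are below) =====
def Claim_equal_reverse_classes : Prop := ∀ (code_lines : List String), Dom_reverse_classes code_lines → Spec_reverse_classes code_lines (reverse_classes code_lines)

-- ===== LEMMAS AND PROOFS =====

-- the common reference function: blocks of `ls` from the last 'class ' header to the first,
-- each block in original order, lines before the first header dropped
def pvP (l : String) : Bool := PySem.Str.startswith l "class "

def pvG : List String → List String
  | [] => []
  | l :: ls =>
    if pvP l then
      pvG (ls.dropWhile (fun x => !pvP x)) ++ (l :: ls.takeWhile (fun x => !pvP x))
    else pvG ls
termination_by ls => ls.length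
decreasing_by
  · have := List.length_dropWhile_le (p := fun x => !pvP x) (l := ls)
    simpa using Nat.lt_succ_of_le this
  · simp

-- unfolding of pvG at a header line
theorem pvG_cons_pos (l : String) (ls : List String) (hp : pvP l = true) :
    pvG (l :: ls) = pvG (ls.dropWhile (fun x => !pvP x)) ++ (l :: ls.takeWhile (fun x => !pvP x)) := by
  rw [pvG.eq_def]
  simp [hp]

-- A's finalization of a loop state
def pvFinA (st : List (List String) × List String × Bool) : List String :=
  ((if st.2.1 ≠ [] then st.1 ++ [st.2.1] else st.1).reverse).flatMap id

-- A's loop from an inside-class state with nonempty current block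
theorem pvA_inside (ls : List String) : ∀ (blocks : List (List String)) (cur : List String),
    cur ≠ [] →
    pvFinA (ls.foldl revClsStepA (blocks, cur, true)) =
      pvG (ls.dropWhile (fun x => !pvP x)) ++ (cur ++ ls.takeWhile (fun x => !pvP x))
        ++ (blocks.reverse).flatMap id := by
  induction ls with
  | nil =>
    intro blocks cur hcur
    simp [pvFinA, hcur, pvG]
  | cons l ls ih =>
    intro blocks cur hcur
    by_cases hp : pvP l
    · have hstep : revClsStepA (blocks, cur, true) l = (blocks ++ [cur], [l], true) := by
        simp [revClsStepA, pvP] at hp ⊢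
        simp [hp, hcur]
      rw [List.foldl_cons, hstep, ih (blocks ++ [cur]) [l] (by simp)]
      simp [hp, pvG_cons_pos l ls hp]
    · have hstep : revClsStepA (blocks, cur, true) l = (blocks, cur ++ [l], true) := by
        simp [revClsStepA, pvP] at hp ⊢
        simp [hp]
      rw [List.foldl_cons, hstep, ih blocks (cur ++ [l]) (by simp)]
      simp [hp]
  
-- A's loop from the initial state
theorem pvA_init (ls : List String) :
    pvFinA (ls.foldl revClsStepA ([], [], false)) = pvG (ls.dropWhile (fun x => !pvP x)) := by
  induction ls with
  | nil => simp [pvFinA, pvG]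
  | cons l ls ih =>
    by_cases hp : pvP l
    · have hstep : revClsStepA (([] : List (List String)), ([] : List String), false) l
          = ([], [l], true) := by
        simp [revClsStepA, pvP] at hp ⊢
        simp [hp]
      rw [List.foldl_cons, hstep, pvA_inside ls [] [l] (by simp)]
      rw [List.dropWhile_cons]
      simp [hp, pvG]
    · have hstep : revClsStepA (([] : List (List String)), ([] : List String), false) l
          = ([], [], false) := by
        simp [revClsStepA, pvP] at hp ⊢
        simp [hp]
      rw [List.foldl_cons, hstep, ih]
      simp [hp]

theorem reverse_classes_eq_pvG (ls : List String) :
    reverse_classes ls = pvG (ls.dropWhile (fun x => !pvP x)) := by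
  have := pvA_init ls
  simpa [reverse_classes, pvFinA] using this

-- B's loop over the reverse of a suffix
theorem pvB_inv (ls : List String) :
    ls.reverse.foldl revClsStepB ([], []) =
      (pvG (ls.dropWhile (fun x => !pvP x)), (ls.takeWhile (fun x => !pvP x)).reverse) := by
  induction ls with
  | nil => simp [pvG]
  | cons l ls ih =>
    by_cases hp : pvP l
    · rw [List.reverse_cons, List.foldl_append, ih]
      have hstep : revClsStepB (pvG (ls.dropWhile (fun x => !pvP x)),
          (ls.takeWhile (fun x => !pvP x)).reverse) l =
          (pvG (ls.dropWhile (fun x => !pvP x)) ++ (l :: ls.takeWhile (fun x => !pvP x)), []) := by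
        simp [revClsStepB, pvP] at hp ⊢
        simp [hp]
      rw [List.foldl_cons, List.foldl_nil, hstep]
      simp [hp, pvG_cons_pos l ls hp]
    · rw [List.reverse_cons, List.foldl_append, ih]
      have hstep : revClsStepB (pvG (ls.dropWhile (fun x => !pvP x)),
          (ls.takeWhile (fun x => !pvP x)).reverse) l =
          (pvG (ls.dropWhile (fun x => !pvP x)),
            (ls.takeWhile (fun x => !pvP x)).reverse ++ [l]) := by
        simp [revClsStepB, pvP] at hp ⊢
        simp [hp]
      rw [List.foldl_cons, List.foldl_nil, hstep]
      simp [hp]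

theorem reverse_classes_alt_eq_pvG (ls : List String) :
    reverse_classes_alt ls = pvG (ls.dropWhile (fun x => !pvP x)) := by
  unfold reverse_classes_alt
  rw [pvB_inv]

-- ===== VERDICT (by name: the statement is the Claim_ definition above) =====
theorem reverse_classes_spec : Claim_equal_reverse_classes := by
  intro ls _
  unfold Spec_reverse_classes
  rw [reverse_classes_eq_pvG, reverse_classes_alt_eq_pvG]
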